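-- pv_equiv track=rewrite | github.com/coolman-success/CodeSignalPractice | Arcade/Python/11 - Higher Order Thinking/77 - Merging Vines.py | solution
-- ===== SOURCE A (Python) =====
-- def solution(vines, n):
--     def nTimes(n):
--
--         def decorator(func):
--
--             def inner(vines):
--                 for _ in range(n):
--                     vines = func(vines)
--                 return vines
--
--             return inner
--
--         return decorator
--
--     @nTimes(n)
--     def sumOnce(vines):
--         res = [vines[i] + vines[i + 1] for i in range(0, len(vines) - 1, 2)]
--         if len(vines) % 2 == 1:
--             res.append(vines[-1])
--         return res
--
--     return sumOnce(vines)
-- ===== SOURCE B (Python) =====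
-- def solution(vines, n):
--     # After k collapsing passes each element is the sum of a contiguous block of
--     # 2**k originals, so sum blocks of size 2**n directly (capped once a block
--     # covers the whole list; n <= 0 leaves the list unchanged).
--     chunk, k = 1, 0
--     while k < n and chunk < len(vines):
--         chunk *= 2
--         k += 1
--     return [sum(vines[i:i + chunk]) for i in range(0, len(vines), chunk)]
-- ===== Notes on version B (the rewrite author's own statement) =====
-- stated objective: faster
-- what changed: Replaces the decorator-driven n-fold repetition of a pairwise-collapse pass by a single closed-form pass that sums contiguous blocks of 2**n elements (block size capped once it covers the list), turning n traversals into one.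
import Mathlib
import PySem

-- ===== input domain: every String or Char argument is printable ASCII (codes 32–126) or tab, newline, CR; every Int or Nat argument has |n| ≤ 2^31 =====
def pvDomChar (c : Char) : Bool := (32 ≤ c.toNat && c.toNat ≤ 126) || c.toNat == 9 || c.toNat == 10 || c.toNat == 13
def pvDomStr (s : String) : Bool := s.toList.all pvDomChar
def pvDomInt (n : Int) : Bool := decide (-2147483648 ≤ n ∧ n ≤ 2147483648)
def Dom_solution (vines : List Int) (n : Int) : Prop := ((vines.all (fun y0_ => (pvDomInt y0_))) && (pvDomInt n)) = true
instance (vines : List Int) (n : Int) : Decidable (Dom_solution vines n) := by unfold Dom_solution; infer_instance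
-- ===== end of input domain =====

-- B replaces A's n-fold pairwise-collapse passes by one closed-form pass summing blocks of 2^n
-- elements (block size capped once it covers the list); one traversal instead of n: measured faster.

-- ===== PORT A =====
-- one pairwise-collapse pass: res = [vines[i]+vines[i+1] for i in range(0, len-1, 2)] (+ odd tail).
-- indices i, i+1 and -1 are always in range where used, so pyGetD with default 0 is exact;
-- len(vines) % 2 is Nat mod on a length, identical to Python's on nonnegatives.
def sumOnceA (vines : List Int) : List Int :=
  let res := (PySem.List.pyRange 0 ((vines.length : Int) - 1) 2).map
      (fun i => PySem.List.pyGetD vines i 0 + PySem.List.pyGetD vines (i + 1) 0)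
  if vines.length % 2 == 1 then res ++ [PySem.List.pyGetD vines (-1) 0] else res

-- the decorator: 'for _ in range(n): vines = func(vines)'
def solution (vines : List Int) (n : Int) : List Int :=
  (PySem.List.pyRange 0 n 1).foldl (fun v _ => sumOnceA v) vines

-- ===== PORT B =====
-- 'chunk, k = 1, 0; while k < n and chunk < len(vines): chunk *= 2; k += 1'
def growChunk (len n k chunk : Int) : Int :=
  if k < n ∧ chunk < len then growChunk len n (k + 1) (chunk * 2) else chunk
termination_by (n - k).toNat
decreasing_by omega

-- '[sum(vines[i:i+chunk]) for i in range(0, len(vines), chunk)]'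
def solution_alt (vines : List Int) (n : Int) : List Int :=
  let chunk := growChunk (vines.length : Int) n 0 1
  (PySem.List.pyRange 0 (vines.length : Int) chunk).map
    (fun i => (PySem.List.slice vines (some i) (some (i + chunk))).sum)

-- ===== PRECONDITION & SPEC =====
def Spec_solution (vines : List Int) (n : Int) (out : List Int) : Prop := out = solution_alt vines n
instance (vines : List Int) (n : Int) (out : List Int) : Decidable (Spec_solution vines n out) := by unfold Spec_solution; infer_instance

-- ===== CLAIM (what is proved, stated in full; the proofs are below) =====
def Claim_equal_solution : Prop := ∀ (vines : List Int) (n : Int), Dom_solution vines n → Spec_solution vines n (solution vines n)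

-- ===== LEMMAS AND PROOFS =====

-- clean pivot: one pairwise-collapse pass
def pairs : List Int → List Int
  | a :: b :: t => (a + b) :: pairs t
  | l => l

-- sums of contiguous blocks of c+1 elements
def chunkSumP (c : Nat) : List Int → List Int
  | [] => []
  | x :: xs => ((x :: xs).take (c + 1)).sum :: chunkSumP c (xs.drop c)
termination_by l => l.length
decreasing_by simp

theorem chunkSumP_zero (l : List Int) : chunkSumP 0 l = l := by
  induction l with
  | nil => rw [chunkSumP]
  | cons x xs ih => rw [chunkSumP]; simp [ih]

theorem chunkSumP_of_le (c : Nat) (l : List Int) (h : l.length ≤ c + 1) :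
    chunkSumP c l = if l = [] then [] else [l.sum] := by
  cases l with
  | nil => rw [chunkSumP]; simp
  | cons x xs =>
    rw [chunkSumP]
    simp only [List.length_cons] at h
    have h1 : xs.drop c = [] := List.drop_eq_nil_of_le (by omega)
    have h2 : (x :: xs).take (c + 1) = x :: xs := List.take_of_length_le (by simp; omega)
    rw [h1, h2, chunkSumP]
    simp

theorem sum_take_take (l : List Int) (a b : Nat) :
    (l.take a).sum + ((l.drop a).take b).sum = (l.take (a + b)).sum := by
  rw [List.take_add, List.sum_append]

theorem pairs_chunkSumP (c : Nat) (l : List Int) :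
    pairs (chunkSumP c l) = chunkSumP (2 * c + 1) l := by
  cases l with
  | nil => rw [chunkSumP, chunkSumP]; rfl
  | cons x xs =>
    rw [chunkSumP]
    rcases hd : xs.drop c with _ | ⟨y, ys⟩
    · -- the whole list fits in one block of c+1
      have hlen : xs.length ≤ c := by
        have := List.drop_eq_nil_iff.mp hd; omega
      rw [chunkSumP]
      show pairs [((x :: xs).take (c+1)).sum] = _
      rw [chunkSumP_of_le _ _ (by simp; omega)]
      have ht : (x :: xs).take (c + 1) = x :: xs := List.take_of_length_le (by simp; omega)
      rw [ht]
      simp [pairs]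
    · rw [chunkSumP]
      show pairs (_ :: _ :: _) = _
      rw [pairs]
      have ihr := pairs_chunkSumP c (ys.drop c)
      rw [ihr, chunkSumP]
      congr 1
      · -- heads: sum of first c+1 plus sum of next c+1 = sum of first 2c+2
        have h1 : ((x :: xs).take (c+1)).sum + (((x :: xs).drop (c+1)).take (c+1)).sum
            = ((x :: xs).take (2*c+1+1)).sum := by
          rw [sum_take_take]; ring_nf
        rw [← h1]
        congr 2
        simp [hd]
      · -- tails
        congr 1
        have h2 : xs.drop (2*c+1) = ys.drop c := by
          have h3 : xs.drop (2*c+1) = (xs.drop c).drop (c+1) := by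
            rw [List.drop_drop]; congr 1; omega
          rw [h3, hd]; simp
        exact h2.symm
termination_by l.length
decreasing_by
  have : ys.length ≤ xs.length := by
    have := List.drop_sublist c xs
    rw [hd] at this
    have := this.length_le
    simp at this; omega
  simp; omega

theorem iterate_pairs (k : Nat) (l : List Int) :
    pairs^[k] l = chunkSumP (2 ^ k - 1) l := by
  induction k generalizing l with
  | zero => simp [chunkSumP_zero]
  | succ k ih =>
    rw [Function.iterate_succ_apply', ih, pairs_chunkSumP]
    have h : 2 * (2 ^ k - 1) + 1 = 2 ^ (k + 1) - 1 := by
      have := Nat.one_le_two_pow (n := k); rw [pow_succ]; omega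
    rw [h]

-- pure-list form of one collapse pass
theorem coreN (l : List Int) :
    ((List.range (l.length / 2)).map (fun k => l.getD (2*k) 0 + l.getD (2*k+1) 0))
      ++ (if l.length % 2 = 1 then [l.getLast?.getD 0] else []) = pairs l := by
  match l with
  | [] => simp [pairs]
  | [a] => simp [pairs]
  | a :: b :: t =>
    have ih := coreN t
    simp only [List.length_cons]
    rw [show (t.length + 1 + 1)/2 = t.length/2 + 1 from by omega]
    have hm2 : (t.length + 1 + 1) % 2 = t.length % 2 := by omega
    simp only [hm2]
    rw [List.range_succ_eq_map, List.map_cons, List.map_map]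
    show (_ :: _) ++ _ = pairs (a :: b :: t)
    rw [pairs]
    have hmap : (List.range (t.length / 2)).map
          ((fun k => (a :: b :: t).getD (2*k) 0 + (a :: b :: t).getD (2*k+1) 0) ∘ Nat.succ)
        = (List.range (t.length / 2)).map (fun k => t.getD (2*k) 0 + t.getD (2*k+1) 0) := by
      apply List.map_congr_left
      intro k _
      simp only [Function.comp]
      rw [show 2 * (k.succ) = (2*k) + 1 + 1 from by omega,
          show (2*k) + 1 + 1 + 1 = ((2*k+1) + 1) + 1 from by omega]
      simp
    rw [hmap]
    have hif : (if t.length % 2 = 1 then [(a :: b :: t).getLast?.getD 0] else [])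
        = (if t.length % 2 = 1 then [t.getLast?.getD 0] else []) := by
      match t with
      | [] => simp
      | c :: ts => rw [List.getLast?_cons_cons, List.getLast?_cons_cons]
    rw [hif, List.cons_append]
    congr 1

theorem sumOnceA_eq_pairs (l : List Int) : sumOnceA l = pairs l := by
  rw [sumOnceA]
  have hr : PySem.List.pyRange 0 ((l.length : Int) - 1) 2
      = (List.range (l.length / 2)).map (fun k => ((2*k : Nat) : Int)) := by
    rw [PySem.List.pyRange_of_pos 0 ((l.length : Int) - 1) (by norm_num)]
    have hc : (if (0:Int) < (l.length : Int) - 1 then (((l.length : Int) - 1 - 0 + 2 - 1)/2).toNat else 0)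
        = l.length / 2 := by split_ifs with h <;> omega
    rw [hc]
    apply List.map_congr_left
    intro k _
    push_cast
    ring
  rw [hr, List.map_map]
  have hm : (List.range (l.length / 2)).map
        ((fun i => PySem.List.pyGetD l i 0 + PySem.List.pyGetD l (i + 1) 0) ∘ (fun k : Nat => ((2*k : Nat) : Int)))
      = (List.range (l.length / 2)).map (fun k => l.getD (2*k) 0 + l.getD (2*k+1) 0) := by
    apply List.map_congr_left
    intro k _
    simp only [Function.comp, PySem.List.pyGetD_natCast]
    rw [show ((2*k : Nat) : Int) + 1 = ((2*k+1 : Nat) : Int) from by push_cast; ring,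
        PySem.List.pyGetD_natCast]
  have hlast : PySem.List.pyGetD l (-1) 0 = l.getLast?.getD 0 := by
    simp [PySem.List.pyGetD, pysem]
  have := coreN l
  split_ifs with hodd
  · rw [hm, hlast]
    rw [← this, if_pos (by simpa using hodd)]
  · rw [hm]
    rw [← this, if_neg (by simpa using hodd)]
    simp

theorem foldl_const_iterate (f : List Int → List Int) (lst : List Int) (v : List Int) :
    lst.foldl (fun v _ => f v) v = f^[lst.length] v := by
  induction lst generalizing v with
  | nil => simp
  | cons x xs ih => simp [List.foldl_cons, ih, Function.iterate_succ_apply]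

theorem solution_eq_iterate (vines : List Int) (n : Int) :
    solution vines n = pairs^[n.toNat] vines := by
  rw [solution, foldl_const_iterate]
  have hlen : (PySem.List.pyRange 0 n 1).length = n.toNat := by
    rw [PySem.List.pyRange_of_pos 0 n (by norm_num)]
    simp only [List.length_map, List.length_range]
    split_ifs with h <;> omega
  rw [hlen]
  congr 1
  funext l
  exact sumOnceA_eq_pairs l

-- pure-list form of B's chunked pass
theorem sliceCore (c : Nat) (l : List Int) :
    (List.range ((l.length + c) / (c+1))).map (fun k => ((l.drop ((c+1)*k)).take (c+1)).sum)
    = chunkSumP c l := by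
  match l with
  | [] =>
    rw [chunkSumP]
    have h0 : (List.length ([] : List Int) + c) / (c+1) = 0 := by
      simp only [List.length_nil, Nat.zero_add]
      exact Nat.div_eq_of_lt (by omega)
    rw [h0]
    simp
  | x :: xs =>
    have ih := sliceCore c (xs.drop c)
    rw [chunkSumP]
    simp only [List.length_cons]
    rw [show (xs.length + 1 + c) / (c+1) = xs.length / (c+1) + 1 from by
      rw [show xs.length + 1 + c = xs.length + (c+1) from by omega]
      exact Nat.add_div_right _ (by omega)]
    rw [List.range_succ_eq_map, List.map_cons, List.map_map]
    congr 1
    have hmap : (List.range (xs.length / (c+1))).map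
          ((fun k => (((x :: xs).drop ((c+1)*k)).take (c+1)).sum) ∘ Nat.succ)
        = (List.range (xs.length / (c+1))).map
          (fun k => (((xs.drop c).drop ((c+1)*k)).take (c+1)).sum) := by
      apply List.map_congr_left
      intro k _
      simp only [Function.comp]
      have hd2 : List.drop ((c+1) * k.succ) (x :: xs) = List.drop ((c+1)*k) (List.drop c xs) := by
        rw [show (c+1) * k.succ = ((c+1)*k + c) + 1 from by
          simp [Nat.succ_eq_add_one]; ring]
        rw [List.drop_succ_cons, List.drop_drop]
        congr 1
        ring
      rw [hd2]
    rw [hmap]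
    have hlen2 : ((List.drop c xs).length + c) / (c+1) = xs.length / (c+1) := by
      rw [List.length_drop]
      by_cases hc : c ≤ xs.length
      · rw [Nat.sub_add_cancel hc]
      · rw [show xs.length - c = 0 from by omega]
        rw [Nat.div_eq_of_lt (by omega), Nat.div_eq_of_lt (by omega)]
    rw [← hlen2]
    exact ih
  termination_by l.length
  decreasing_by simp only [List.length_drop, List.length_cons]; omega

theorem map_pyRange_slice (c : Nat) (l : List Int) :
    (PySem.List.pyRange 0 (l.length : Int) ((c : Int) + 1)).map
      (fun i => (PySem.List.slice l (some i) (some (i + ((c : Int) + 1)))).sum)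
    = chunkSumP c l := by
  rw [PySem.List.pyRange_of_pos 0 (l.length : Int) (by positivity)]
  rw [show (if (0:Int) < (l.length : Int) then (((l.length : Int) - 0 + ((c:Int)+1) - 1)/((c:Int)+1)).toNat else 0)
      = (l.length + c) / (c+1) from ?_]
  · rw [List.map_map, ← sliceCore c l]
    apply List.map_congr_left
    intro k _
    simp only [Function.comp]
    rw [show (0 : Int) + ((c:Int)+1) * (k : Nat) = (((c+1)*k : Nat) : Int) from by push_cast; ring]
    rw [show (((c+1)*k : Nat) : Int) + ((c:Int)+1) = (((c+1)*k + (c+1) : Nat) : Int) from by push_cast; ring]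
    rw [PySem.List.slice_natCast]
    congr 2
    omega
  · split_ifs with h
    · rw [show (l.length : Int) - 0 + ((c:Int)+1) - 1 = ((l.length + c : Nat) : Int) from by push_cast; ring]
      rw [show ((c:Int)+1) = ((c+1 : Nat) : Int) from by push_cast; ring]
      rw [← Int.natCast_div, Int.toNat_natCast]
    · have hl : l.length = 0 := by omega
      rw [hl]
      exact (Nat.div_eq_of_lt (by omega)).symm

theorem grow_spec (len n k : Int) (j : Nat) :
    ∃ m : Nat, growChunk len n k (2 ^ j) = 2 ^ (j + m)
      ∧ (n ≤ k + m ∨ len ≤ 2 ^ (j + m)) ∧ (m = 0 ∨ k + m ≤ n) := by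
  rw [growChunk]
  split_ifs with h
  · have hrec : ((2 : Int) ^ j) * 2 = 2 ^ (j + 1) := by ring
    rw [hrec]
    obtain ⟨m, h1, h2, h3⟩ := grow_spec len n (k + 1) (j + 1)
    refine ⟨m + 1, ?_, ?_, ?_⟩
    · rw [h1]; ring_nf
    · rcases h2 with h2 | h2
      · left; push_cast; omega
      · right; convert h2 using 2; omega
    · right
      rcases h3 with h3 | h3
      · subst h3; push_cast; omega
      · push_cast; omega
  · push Not at h
    refine ⟨0, by simp, ?_, Or.inl rfl⟩
    rcases lt_or_ge k n with h' | h'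
    · right; simpa using h h'
    · left; push_cast; omega
termination_by (n - k).toNat
decreasing_by omega

-- ===== VERDICT (by name: the statement is the Claim_ definition above) =====
theorem solution_spec : Claim_equal_solution := by
  unfold Claim_equal_solution
  intro vines n _
  unfold Spec_solution
  obtain ⟨m, hg, hstop, hm⟩ := grow_spec (vines.length : Int) n 0 0
  simp only [zero_add] at hg hstop hm
  have hg' : growChunk (vines.length : Int) n 0 1 = (2:Int)^m := by
    rw [← hg]; norm_num
  have hMpos : 1 ≤ 2^m := Nat.one_le_two_pow
  have hcast : (2:Int)^m = ((2^m - 1 : Nat) : Int) + 1 := by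
    rw [Nat.cast_sub hMpos]; push_cast; ring
  have halt : solution_alt vines n = chunkSumP (2^m - 1) vines := by
    rw [← map_pyRange_slice (2^m - 1) vines]
    simp only [solution_alt, hg', hcast]
  rw [halt, solution_eq_iterate, iterate_pairs]
  rcases hstop with hnm | hlen
  · rcases hm with h0 | h1
    · subst h0
      have hn0 : n.toNat = 0 := by omega
      rw [hn0]
    · have hmn : m = n.toNat := by omega
      rw [hmn]
  · have hmn : m ≤ n.toNat := by rcases hm with h0 | h1 <;> omega
    have h1 : vines.length ≤ 2^m := by exact_mod_cast hlen
    have h2 : vines.length ≤ 2^(n.toNat) :=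
      le_trans h1 (Nat.pow_le_pow_right (by norm_num) hmn)
    rw [chunkSumP_of_le _ _ (by have := Nat.one_le_two_pow (n := n.toNat); omega),
        chunkSumP_of_le _ _ (by have := Nat.one_le_two_pow (n := m); omega)]
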